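-- pv_equiv track=rewrite | github.com/vs228228/ChessProjectOnPython | main.py | findYPos
-- ===== SOURCE A (Python) =====
-- def findYPos(px):
--     y = 0
--     startPX = 28
--     while y < 7:
--         if startPX < px:
--             y += 1
--             if startPX == 136:
--                 startPX += 55
--             else:
--                 startPX += 54
--         else:
--             break
--     return y
-- ===== SOURCE B (Python) =====
-- def findYPos(px):
--     # Closed form: the board row is determined arithmetically, with no loop or table.
--     # Boundaries split into two arithmetic progressions (step 54) because of the
--     # single +55 step after 136: 28,82,136 and 191,245,299,353.
--     # Count of members of each progression strictly below px, clamped to its length.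
--     lo = (px - 29) // 54 + 1          # how many of 28,82,136 are < px (before clamping)
--     hi = (px - 192) // 54 + 1         # how many of 191,245,299,353 are < px
--     return min(3, max(0, lo)) + min(4, max(0, hi))
-- ===== Notes on version B (the rewrite author's own statement) =====
-- stated objective: alternative
-- what changed: Replaced the stateful while-loop with a loop-free closed-form: the thresholds form two arithmetic progressions (step 54, split by the one +55 step), so the row is two clamped floor-division counts added together.
import Mathlib
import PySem

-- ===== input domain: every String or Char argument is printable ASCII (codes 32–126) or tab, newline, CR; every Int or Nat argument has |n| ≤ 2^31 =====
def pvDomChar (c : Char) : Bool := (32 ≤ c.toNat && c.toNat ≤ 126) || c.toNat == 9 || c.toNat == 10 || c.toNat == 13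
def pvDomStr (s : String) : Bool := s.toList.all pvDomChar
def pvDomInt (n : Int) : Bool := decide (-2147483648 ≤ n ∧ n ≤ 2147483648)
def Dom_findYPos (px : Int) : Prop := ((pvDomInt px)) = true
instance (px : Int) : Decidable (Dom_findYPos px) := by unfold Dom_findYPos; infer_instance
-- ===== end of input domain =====

-- B replaces A's stateful while-loop by a loop-free closed form: the thresholds are two
-- arithmetic progressions of step 54, so the row is two clamped floor-division counts (objective: alternative).


-- ===== PORT A =====
-- while-loop of A as fuel recursion; y increases each iteration and the guard is y < 7,
-- so fuel 7 is exact.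
def findYPosLoop : Nat → Int → Int → Int → Int
  | 0, y, _, _ => y
  | fuel + 1, y, startPX, px =>
    if y < 7 then
      if startPX < px then
        findYPosLoop fuel (y + 1) (if startPX = 136 then startPX + 55 else startPX + 54) px
      else y
    else y

def findYPos (px : Int) : Int := findYPosLoop 7 0 28 px

-- ===== PORT B =====
def findYPos_alt (px : Int) : Int :=
  let lo := PySem.Int.floordiv (px - 29) 54 + 1
  let hi := PySem.Int.floordiv (px - 192) 54 + 1
  min 3 (max 0 lo) + min 4 (max 0 hi)

-- ===== PRECONDITION & SPEC =====
def Spec_findYPos (px : Int) (out : Int) : Prop := out = findYPos_alt px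
instance (px : Int) (out : Int) : Decidable (Spec_findYPos px out) := by unfold Spec_findYPos; infer_instance

-- ===== CLAIM (what is proved, stated in full; the proofs are below) =====
def Claim_equal_findYPos : Prop := ∀ (px : Int), Dom_findYPos px → Spec_findYPos px (findYPos px)

-- ===== LEMMAS AND PROOFS =====

-- ===== VERDICT (by name: the statement is the Claim_ definition above) =====
theorem findYPos_spec : Claim_equal_findYPos := by
  intro px _
  unfold Spec_findYPos findYPos findYPos_alt
  rw [PySem.Int.floordiv_eq_ediv_of_pos (by norm_num),
      PySem.Int.floordiv_eq_ediv_of_pos (by norm_num)]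
  simp only [findYPosLoop]
  norm_num
  split_ifs <;> omega
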